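-- pv_equiv track=rewrite | github.com/en105013/baccarat-system | strategy.py | markov2
-- ===== SOURCE A (Python) =====
-- from collections import defaultdict, Counter, deque
--
-- def _clean(r):
--     return [x for x in r if x in ("B", "P")]
--
-- def markov2(r):
--     s = _clean(r)
--     if len(s) < 3:
--         return "B"
--     t = defaultdict(Counter)
--     for i in range(len(s) - 2):
--         t[(s[i], s[i + 1])][s[i + 2]] += 1
--     c = t.get((s[-2], s[-1]))
--     return "B" if not c or c["B"] >= c["P"] else "P"
-- ===== SOURCE B (Python) =====
-- def markov2(r):
--     s = [x for x in r if x in ("B", "P")]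
--     if len(s) < 3:
--         return "B"
--     ctx = (s[-2], s[-1])
--     cb = cp = 0
--     for x, y, z in zip(s, s[1:], s[2:]):
--         if (x, y) == ctx:
--             if z == "B":
--                 cb += 1
--             elif z == "P":
--                 cp += 1
--     return "B" if cb >= cp else "P"
-- ===== Notes on version B (the rewrite author's own statement) =====
-- stated objective: simpler
-- what changed: B drops A's defaultdict-of-Counters transition table entirely: it fixes the queried context (s[-2], s[-1]) up front and keeps just two integer counters while scanning the sliding triples produced by zip, instead of indexing and counting followers for every context.
import Mathlib
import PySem

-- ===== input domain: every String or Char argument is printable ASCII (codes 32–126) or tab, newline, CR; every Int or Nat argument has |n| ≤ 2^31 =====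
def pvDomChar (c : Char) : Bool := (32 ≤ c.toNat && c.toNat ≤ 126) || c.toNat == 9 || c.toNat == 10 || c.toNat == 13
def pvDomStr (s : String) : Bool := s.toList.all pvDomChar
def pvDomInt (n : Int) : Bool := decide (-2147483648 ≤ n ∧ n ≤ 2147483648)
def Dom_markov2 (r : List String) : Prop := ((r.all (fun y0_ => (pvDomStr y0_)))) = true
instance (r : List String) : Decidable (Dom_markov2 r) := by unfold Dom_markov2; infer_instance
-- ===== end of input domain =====

-- B replaces A's defaultdict-of-Counters transition table by two scalar counters for the
-- single queried context, scanning sliding-window triples with zip (objective: simpler).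


-- ===== PORT A =====
-- _clean(r)
def markov2Clean (r : List String) : List String :=
  r.filter (fun x => x == "B" || x == "P")

def markov2 (r : List String) : String :=
  let s := markov2Clean r
  if s.length < 3 then "B"
  else
    -- t = defaultdict(Counter); t[(s[i], s[i+1])][s[i+2]] += 1 over i in range(len(s)-2)
    let t := (PySem.List.pyRange 0 ((s.length : Int) - 2) 1).foldl
      (fun (t : PySem.Dict (String × String) (PySem.Dict String Int)) i =>
        t.modify (PySem.List.pyGetD s i "", PySem.List.pyGetD s (i+1) "") PySem.Dict.empty
          (fun c => c.modify (PySem.List.pyGetD s (i+2) "") 0 (· + 1)))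
      PySem.Dict.empty
    -- c = t.get((s[-2], s[-1])); "B" if not c or c["B"] >= c["P"] else "P"
    match t.get? (PySem.List.pyGetD s (-2) "", PySem.List.pyGetD s (-1) "") with
    | none => "B"
    | some c => if c.items.isEmpty || decide (c.getD "B" 0 ≥ c.getD "P" 0) then "B" else "P"

-- ===== PORT B =====
def markov2_alt (r : List String) : String :=
  let s := r.filter (fun x => x == "B" || x == "P")
  if s.length < 3 then "B"
  else
    let ctx := (PySem.List.pyGetD s (-2) "", PySem.List.pyGetD s (-1) "")
    -- for x, y, z in zip(s, s[1:], s[2:]):  (s[1:] / s[2:] are exactly List.drop 1 / 2)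
    let cc := ((s.zip (s.drop 1)).zip (s.drop 2)).foldl
      (fun (cc : Int × Int) p =>
        if p.1 == ctx then
          if p.2 == "B" then (cc.1 + 1, cc.2)
          else if p.2 == "P" then (cc.1, cc.2 + 1)
          else cc
        else cc) ((0 : Int), (0 : Int))
    if cc.1 ≥ cc.2 then "B" else "P"

-- ===== PRECONDITION & SPEC =====
def Spec_markov2 (r : List String) (out : String) : Prop := out = markov2_alt r
instance (r : List String) (out : String) : Decidable (Spec_markov2 r out) := by unfold Spec_markov2; infer_instance

-- ===== CLAIM (what is proved, stated in full; the proofs are below) =====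
def Claim_equal_markov2 : Prop := ∀ (r : List String), Dom_markov2 r → Spec_markov2 r (markov2 r)

-- ===== LEMMAS AND PROOFS =====

/-- The sliding window of consecutive triples of a list. -/
def trips : List String → List ((String × String) × String)
  | x :: y :: z :: r => ((x, y), z) :: trips (y :: z :: r)
  | _ => []

lemma zip_trips (s : List String) : (s.zip (s.drop 1)).zip (s.drop 2) = trips s := by
  induction s using trips.induct with
  | case1 x y z r ih => simp [trips]; simpa using ih
  | case2 s h =>
      match s, h with
      | [], _ => simp [trips]
      | [a], _ => simp [trips]
      | [a, b], _ => simp [trips]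
      | x :: y :: z :: t, h => exact absurd rfl (h x y z t)

lemma range_fold_trips {β : Type} (f : β → ((String × String) × String) → β) :
    ∀ (s : List String) (init : β),
    (List.range (s.length - 2)).foldl
      (fun t k => f t ((s.getD k "", s.getD (k+1) ""), s.getD (k+2) "")) init
    = (trips s).foldl f init := by
  intro s
  induction s using trips.induct with
  | case1 x y z r ih =>
      intro init
      have hn : (x :: y :: z :: r).length - 2 = r.length + 1 := by simp
      rw [hn, List.range_succ_eq_map, List.foldl_cons, List.foldl_map]
      have h2 : (y :: z :: r).length - 2 = r.length := by simp
      have := ih (f init ((x, y), z))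
      rw [h2] at this
      simp only [List.getD_cons_succ, List.getD_cons_zero, Nat.succ_eq_add_one] at this ⊢
      simpa [trips] using this
  | case2 s h =>
      intro init
      match s, h with
      | [], _ => simp [trips]
      | [a], _ => simp [trips]
      | [a, b], _ => simp [trips]
      | x :: y :: z :: t, h => exact absurd rfl (h x y z t)

lemma pyfold {β : Type} (f : β → ((String × String) × String) → β) (s : List String) (init : β) :
    (PySem.List.pyRange 0 ((s.length : Int) - 2) 1).foldl
      (fun t i => f t ((PySem.List.pyGetD s i "", PySem.List.pyGetD s (i+1) ""),
                        PySem.List.pyGetD s (i+2) "")) init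
    = (trips s).foldl f init := by
  rw [PySem.List.pyRange_one,
    show (((s.length : Int) - 2) - 0).toNat = s.length - 2 from by omega, List.foldl_map]
  refine Eq.trans (PySem.List.foldl_congr_mem _ _
    (fun t k => f t ((s.getD k "", s.getD (k+1) ""), s.getD (k+2) "")) init ?_)
    (range_fold_trips f s init)
  intro t k _
  rw [show (0 : Int) + (k : Int) + 2 = ((k + 2 : Nat) : Int) from by omega,
      show (0 : Int) + (k : Int) + 1 = ((k + 1 : Nat) : Int) from by omega,
      show (0 : Int) + (k : Int) = ((k : Nat) : Int) from by omega,
      PySem.List.pyGetD_natCast, PySem.List.pyGetD_natCast, PySem.List.pyGetD_natCast]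

-- specialization of pyfold to A's dict-building step (beta-reduced form)
lemma pyfold_dict (s : List String) (init : PySem.Dict (String × String) (PySem.Dict String Int)) :
    (PySem.List.pyRange 0 ((s.length : Int) - 2) 1).foldl
      (fun t i =>
        t.modify (PySem.List.pyGetD s i "", PySem.List.pyGetD s (i+1) "") PySem.Dict.empty
          (fun c => c.modify (PySem.List.pyGetD s (i+2) "") 0 (· + 1))) init
    = (trips s).foldl
        (fun t p => t.modify p.1 PySem.Dict.empty (fun c => c.modify p.2 0 (· + 1))) init :=
  pyfold (fun t p => t.modify p.1 PySem.Dict.empty (fun c => c.modify p.2 0 (· + 1))) s init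

lemma dictCount (v : String) :
    ∀ (l : List ((String × String) × String))
      (d : PySem.Dict (String × String) (PySem.Dict String Int)) (k : String × String),
    ((l.foldl (fun t p => t.modify p.1 PySem.Dict.empty (fun c => c.modify p.2 0 (· + 1))) d).getD
        k PySem.Dict.empty).getD v 0
    = (d.getD k PySem.Dict.empty).getD v 0 + (((l.filter (fun p => p.1 == k)).map (·.2)).count v : Int) := by
  intro l
  induction l with
  | nil => intro d k; simp
  | cons p rest ih =>
      intro d k
      rw [List.foldl_cons, ih]
      rw [PySem.Dict.getD_modify]
      by_cases hk : k = p.1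
      · subst hk
        rw [if_pos rfl, PySem.Dict.getD_modify]
        by_cases hv : v = p.2
        · subst hv
          simp
          omega
        · rw [if_neg hv]
          simp [Ne.symm hv]
      · rw [if_neg hk]
        have hne : (p.1 == k) = false := by simpa [beq_iff_eq] using Ne.symm hk
        simp [hne]

lemma bCount (ctx : String × String) :
    ∀ (l : List ((String × String) × String)) (cb cp : Int),
    l.foldl (fun (cc : Int × Int) p =>
        if p.1 == ctx then
          if p.2 == "B" then (cc.1 + 1, cc.2)
          else if p.2 == "P" then (cc.1, cc.2 + 1)
          else cc
        else cc) (cb, cp)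
    = (cb + (((l.filter (fun p => p.1 == ctx)).map (·.2)).count "B" : Int),
       cp + (((l.filter (fun p => p.1 == ctx)).map (·.2)).count "P" : Int)) := by
  intro l
  induction l with
  | nil => intro cb cp; simp
  | cons p rest ih =>
      intro cb cp
      rw [List.foldl_cons]
      by_cases hk : (p.1 == ctx) = true
      · rw [if_pos hk]
        by_cases hb : p.2 = "B"
        · rw [if_pos (by simpa using hb)]
          rw [ih]
          simp only [List.filter_cons, hk, if_true, List.map_cons, List.count_cons, hb]
          refine Prod.ext ?_ ?_
          · simp; omega
          · simp
        · rw [if_neg (by simpa using hb)]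
          by_cases hp : p.2 = "P"
          · rw [if_pos (by simpa using hp)]
            rw [ih]
            simp only [List.filter_cons, hk, if_true, List.map_cons, List.count_cons, hp]
            refine Prod.ext ?_ ?_
            · simp
            · simp; omega
          · rw [if_neg (by simpa using hp)]
            rw [ih]
            simp only [List.filter_cons, hk, if_true, List.map_cons, List.count_cons]
            refine Prod.ext ?_ ?_ <;> simp [hb, hp]
      · rw [if_neg hk]
        rw [ih]
        simp [hk]

-- ===== VERDICT (by name: the statement is the Claim_ definition above) =====
theorem markov2_spec : Claim_equal_markov2 := by
  intro r _
  unfold Spec_markov2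
  simp only [markov2, markov2_alt, markov2Clean]
  set s := r.filter (fun x => x == "B" || x == "P") with hs
  by_cases h : s.length < 3
  · simp [h]
  · rw [if_neg h, if_neg h]
    rw [zip_trips, pyfold_dict, bCount]
    set ctx := (PySem.List.pyGetD s (-2) "", PySem.List.pyGetD s (-1) "") with hctx
    have hB := dictCount "B" (trips s) PySem.Dict.empty ctx
    have hP := dictCount "P" (trips s) PySem.Dict.empty ctx
    simp only [PySem.Dict.getD_empty] at hB hP
    cases hg : (((trips s).foldl
        (fun t p => t.modify p.1 PySem.Dict.empty (fun c => c.modify p.2 0 (· + 1)))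
        (PySem.Dict.empty : PySem.Dict (String × String) (PySem.Dict String Int))).get? ctx) with
    | none =>
        have he := PySem.Dict.getD_of_get?_eq_none _ PySem.Dict.empty hg
        rw [he] at hB hP
        simp only [PySem.Dict.getD_empty] at hB hP
        rw [if_pos (by simp; omega)]
    | some c =>
        have he := PySem.Dict.getD_of_get?_eq_some _ PySem.Dict.empty hg
        rw [he] at hB hP
        by_cases hemp : c.items.isEmpty
        · have hc : c = PySem.Dict.empty := by
            cases c with
            | mk items =>
                cases items with
                | nil => rfl
                | cons a l => simp at hemp
          rw [hc] at hB hP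
          simp only [PySem.Dict.getD_empty] at hB hP
          simp only [hemp, Bool.true_or, if_true]
          rw [if_pos (by simp; omega)]
        · simp only [hemp, Bool.false_or]
          by_cases hge : c.getD "B" 0 ≥ c.getD "P" 0
          · rw [if_pos (by simpa using hge), if_pos (by simp; omega)]
          · rw [if_neg (by simpa using hge), if_neg (by simp; omega)]
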